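-- pv_equiv track=rewrite | github.com/SaiRameshkumar14/Python_tuto | zoho/prep2/verybad.py | checking
-- ===== SOURCE A (Python) =====
-- def checking(output, target):
--     max_count = 0
--     result = []
--
--     for i in output:
--         temp = 0
--         for j in i:
--             if j == target:
--                 temp += 1
--
--         if temp > max_count:
--             max_count = temp
--             result = [i]
--         elif temp == max_count:
--             result.append(i)
--
--     return result
-- ===== SOURCE B (Python) =====
-- def checking(output, target):
--     counts = [sum(1 for j in i if j == target) for i in output]
--     m = max(counts, default=0)
--     return [i for i, c in zip(output, counts) if c == m]
-- ===== Notes on version B (the rewrite author's own statement) =====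
-- stated objective: simpler
-- what changed: Replaces the single-pass running-max with reset/append state machine by a build-counts-table, take max, then filter decomposition (the running max is monotone, so the final result is exactly the sublists whose count equals the overall maximum; max(counts, default=0) covers the empty and all-zero cases identically).
import Mathlib
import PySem

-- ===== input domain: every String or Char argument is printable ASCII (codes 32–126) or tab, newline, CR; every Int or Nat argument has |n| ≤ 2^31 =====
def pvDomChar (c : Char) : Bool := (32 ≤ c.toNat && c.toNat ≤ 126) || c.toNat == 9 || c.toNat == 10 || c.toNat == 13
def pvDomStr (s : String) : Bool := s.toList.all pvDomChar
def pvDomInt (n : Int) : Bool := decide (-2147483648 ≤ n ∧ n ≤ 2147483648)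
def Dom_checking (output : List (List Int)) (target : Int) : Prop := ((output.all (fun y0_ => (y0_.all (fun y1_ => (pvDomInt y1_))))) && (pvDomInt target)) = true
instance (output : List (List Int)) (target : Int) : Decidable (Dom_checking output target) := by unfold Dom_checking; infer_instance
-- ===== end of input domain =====

-- B replaces A's running-max-with-reset state machine by a counts-table + max + filter decomposition (objective: simpler).


-- ===== PORT A =====
-- literal transliteration: state (max_count, result), inner loop counts occurrences
def checking (output : List (List Int)) (target : Int) : List (List Int) :=
  (output.foldl
    (fun (st : Int × List (List Int)) i =>
      let temp := i.foldl (fun t j => if j = target then t + 1 else t) (0 : Int)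
      if temp > st.1 then (temp, [i])
      else if temp = st.1 then (st.1, st.2 ++ [i])
      else st)
    ((0 : Int), ([] : List (List Int)))).2

-- ===== PORT B =====
-- sum(1 for j in i if j == target): length of the filtered list
def cntB (target : Int) (i : List Int) : Int :=
  ((i.filter (fun j => j = target)).length : Int)

-- counts are nonnegative, so folding max from 0 is exactly Python's max(counts, default=0)
def checking_alt (output : List (List Int)) (target : Int) : List (List Int) :=
  let counts := output.map (cntB target)
  let m := counts.foldl max (0 : Int)
  ((output.zip counts).filter (fun p => p.2 = m)).map Prod.fst

-- ===== PRECONDITION & SPEC =====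
def Spec_checking (output : List (List Int)) (target : Int) (out : List (List Int)) : Prop := out = checking_alt output target
instance (output : List (List Int)) (target : Int) (out : List (List Int)) : Decidable (Spec_checking output target out) := by unfold Spec_checking; infer_instance

-- ===== CLAIM (what is proved, stated in full; the proofs are below) =====
def Claim_equal_checking : Prop := ∀ (output : List (List Int)) (target : Int), Dom_checking output target → Spec_checking output target (checking output target)

-- ===== LEMMAS AND PROOFS =====

-- A's inner counting loop equals B's filter-length count
theorem cntA_eq_cntB (target : Int) (i : List Int) (t : Int) :
    i.foldl (fun t j => if j = target then t + 1 else t) t = t + cntB target i := by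
  induction i generalizing t with
  | nil => simp [cntB]
  | cons x xs ih =>
    simp only [List.foldl_cons, cntB, List.filter_cons]
    by_cases h : x = target
    · simp only [h, if_true, ih, cntB, List.length_cons, decide_true]
      push_cast; omega
    · simp [h, ih, cntB]

def maxC (target : Int) (l : List (List Int)) : Int :=
  (l.map (cntB target)).foldl max (0 : Int)

theorem foldl_max_ge (l : List Int) (a : Int) : a ≤ l.foldl max a := by
  induction l generalizing a with
  | nil => simp
  | cons x xs ih => exact le_trans (le_max_left a x) (by simpa using ih (max a x))

theorem foldl_max_mono (l : List Int) (a b : Int) (hab : a ≤ b) :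
    l.foldl max a ≤ l.foldl max b := by
  induction l generalizing a b with
  | nil => simpa
  | cons y ys ihy => exact ihy (max a y) (max b y) (max_le_max hab le_rfl)

theorem maxC_ge (target : Int) (l : List (List Int)) (i : List Int) (h : i ∈ l) :
    cntB target i ≤ maxC target l := by
  induction l with
  | nil => simp at h
  | cons x xs ih =>
    rcases List.mem_cons.mp h with h | h
    · subst h
      calc cntB target i ≤ max 0 (cntB target i) := le_max_right _ _
        _ ≤ _ := by simpa [maxC] using foldl_max_ge (xs.map (cntB target)) (max 0 (cntB target i))
    · calc cntB target i ≤ maxC target xs := ih h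
        _ ≤ maxC target (x :: xs) := by
            simpa [maxC] using foldl_max_mono (xs.map (cntB target)) 0 (max 0 (cntB target x)) (le_max_left _ _)

theorem maxC_append (target : Int) (l : List (List Int)) (x : List Int) :
    maxC target (l ++ [x]) = max (maxC target l) (cntB target x) := by
  simp [maxC, List.foldl_append]

-- B's zip-filter-map is a plain filter on counts
theorem zip_filter_eq (target : Int) (l : List (List Int)) (m : Int) :
    ((l.zip (l.map (cntB target))).filter (fun p => p.2 = m)).map Prod.fst
      = l.filter (fun i => cntB target i = m) := by
  induction l with
  | nil => rfl
  | cons x xs ih =>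
    simp only [List.map_cons, List.zip_cons_cons, List.filter_cons]
    by_cases h : cntB target x = m <;> simp [h, ih]

-- the invariant of A's fold: state = (max of counts so far, sublists achieving it)
theorem fold_invariant (target : Int) (l : List (List Int)) :
    l.foldl
      (fun (st : Int × List (List Int)) i =>
        let temp := i.foldl (fun t j => if j = target then t + 1 else t) (0 : Int)
        if temp > st.1 then (temp, [i])
        else if temp = st.1 then (st.1, st.2 ++ [i])
        else st)
      ((0 : Int), ([] : List (List Int)))
    = (maxC target l, l.filter (fun i => cntB target i = maxC target l)) := by
  induction l using List.reverseRecOn with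
  | nil => simp [maxC]
  | append_singleton xs x ih =>
    rw [List.foldl_append, ih]
    simp only [List.foldl_cons, List.foldl_nil]
    rw [cntA_eq_cntB]
    simp only [zero_add]
    rw [maxC_append]
    by_cases h1 : cntB target x > maxC target xs
    · have hmax : max (maxC target xs) (cntB target x) = cntB target x := max_eq_right (le_of_lt h1)
      have hfil : xs.filter (fun i => cntB target i = cntB target x) = [] := by
        rw [List.filter_eq_nil_iff]
        intro i hi hd
        have := maxC_ge target xs i hi
        simp only [decide_eq_true_eq] at hd
        omega
      simp [h1, hmax, List.filter_append, hfil]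
    · by_cases h2 : cntB target x = maxC target xs
      · have hmax : max (maxC target xs) (cntB target x) = maxC target xs := max_eq_left (le_of_eq h2)
        rw [if_neg (by omega), if_pos h2, hmax, List.filter_append]
        simp [h2]
      · have hlt : cntB target x < maxC target xs := by omega
        have hmax : max (maxC target xs) (cntB target x) = maxC target xs := max_eq_left (le_of_lt hlt)
        rw [if_neg (by omega), if_neg h2, hmax, List.filter_append]
        simp [h2]

-- ===== VERDICT (by name: the statement is the Claim_ definition above) =====
theorem checking_spec : Claim_equal_checking := by
  intro output target _
  unfold Spec_checking checking checking_alt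
  rw [fold_invariant, zip_filter_eq]
  unfold maxC
  rfl
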